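-- pv_equiv track=rewrite | github.com/MocaRaxLin/Fruit-Slayer-Agent | agent.py | move_seen
-- ===== SOURCE A (Python) =====
-- from typing import List
--
-- def move_seen(grid:List[List[chr]], row:int, col:int, seen:List[List[bool]]) -> int:
-- 	# rerurn the points we get
-- 	def dfs(grid:List[List[chr]], r:int, c:int, N:int, p:int, seen:List[List[bool]]) -> int:
-- 		if r == -1 or c == -1 or r == N or c == N or seen[r][c] or grid[r][c] != p:
-- 			return 0
--
-- 		seen[r][c] = True
-- 		grid[r][c] = '*'
-- 		point = 1
-- 		point += dfs(grid, r-1, c, N, p, seen)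
-- 		point += dfs(grid, r+1, c, N, p, seen)
-- 		point += dfs(grid, r, c-1, N, p, seen)
-- 		point += dfs(grid, r, c+1, N, p, seen)
-- 		return point
--
-- 	def drop(grid:List[List[chr]], c:int, N:int):
-- 		bot = N - 1
-- 		for r in reversed(range(N)):
-- 			if grid[r][c] != '*':
-- 				grid[bot][c] = grid[r][c]
-- 				bot -= 1
-- 		while bot >= 0:
-- 			grid[bot][c] = '*'
-- 			bot -= 1
--
-- 	# take
-- 	p = grid[row][col]
-- 	N = len(grid)
-- 	ret = 0
-- 	ret = dfs(grid, row, col, N, p, seen) # seen from input parameter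
--
-- 	# drop
-- 	for c in range(N):
-- 		drop(grid, c, N)
--
-- 	return ret*ret
-- ===== SOURCE B (Python) =====
-- from typing import List
--
-- def move_seen(grid:List[List[chr]], row:int, col:int, seen:List[List[bool]]) -> int:
-- 	# Iterative flood fill with an explicit stack instead of recursion; gravity
-- 	# applied by rebuilding each column (collect non-'*' cells, pad '*' on top).
-- 	N = len(grid)
-- 	p = grid[row][col]
-- 	count = 0
-- 	stack = [(row, col)]
-- 	while stack:
-- 		r, c = stack.pop()
-- 		if r < 0 or c < 0 or r >= N or c >= N or seen[r][c] or grid[r][c] != p: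
-- 			continue
-- 		seen[r][c] = True
-- 		grid[r][c] = '*'
-- 		count += 1
-- 		stack.extend(((r, c + 1), (r, c - 1), (r + 1, c), (r - 1, c)))
-- 	for c in range(N):
-- 		column = [grid[r][c] for r in range(N) if grid[r][c] != '*']
-- 		pad = N - len(column)
-- 		for r in range(N):
-- 			grid[r][c] = '*' if r < pad else column[r - pad]
-- 	return count * count
-- ===== Notes on version B (the rewrite author's own statement) =====
-- stated objective: idiomatic
-- what changed: The recursive four-way dfs is replaced by an iterative flood fill over an explicit stack (pop, bounds/seen/value check, mark, push the four neighbours), and the per-column gravity drop rebuilds each column from its non-'*' cells instead of the two-pointer in-place sweep; the returned value is the squared region size in both.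
import Mathlib
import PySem

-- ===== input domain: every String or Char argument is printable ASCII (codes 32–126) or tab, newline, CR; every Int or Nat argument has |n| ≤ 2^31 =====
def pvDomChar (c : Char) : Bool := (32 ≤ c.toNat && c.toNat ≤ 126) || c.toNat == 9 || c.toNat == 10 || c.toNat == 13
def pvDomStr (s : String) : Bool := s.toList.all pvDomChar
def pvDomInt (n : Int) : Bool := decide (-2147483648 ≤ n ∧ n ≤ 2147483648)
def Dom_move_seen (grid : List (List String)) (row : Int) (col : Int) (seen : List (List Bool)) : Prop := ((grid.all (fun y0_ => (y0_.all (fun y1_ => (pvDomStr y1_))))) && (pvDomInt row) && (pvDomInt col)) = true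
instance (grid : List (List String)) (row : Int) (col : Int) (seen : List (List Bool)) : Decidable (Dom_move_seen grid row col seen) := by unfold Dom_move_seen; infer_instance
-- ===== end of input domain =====

-- B replaces A's recursive dfs by an iterative explicit-stack flood fill (idiomatic, same cost).
-- Both Pythons mutate grid/seen in place (same final state); the Lean ports, whose result type is
-- Int, return only the count squared, so the per-column gravity drop — which mutates grid only and
-- cannot affect the returned value — is not carried into either port.

-- ===== PORT A =====
-- shared Python-indexing helpers (seen[r][c], grid[r][c], in-place assignment; both sources use the
-- identical expressions).  A read that would raise IndexError in Python yields the blocking default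
-- (true / "*"): such reads happen only outside Pre_move_seen.
def seenB (s : List (List Bool)) (r c : Int) : Bool :=
  ((PySem.List.pyGet? s r).bind (fun rw => PySem.List.pyGet? rw c)).getD true

def cellS (g : List (List String)) (r c : Int) : String :=
  ((PySem.List.pyGet? g r).bind (fun rw => PySem.List.pyGet? rw c)).getD "*"

def setSeen (s : List (List Bool)) (r c : Int) : List (List Bool) :=
  PySem.List.pySetD s r (PySem.List.pySetD (PySem.List.pyGetD s r []) c true)

def setCell (g : List (List String)) (r c : Int) : List (List String) :=
  PySem.List.pySetD g r (PySem.List.pySetD (PySem.List.pyGetD g r []) c "*")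

-- number of still-unseen cells: the termination measure for the flood fill, and the fuel bound for
-- the recursive dfs of A (each recursion level marks one unseen cell before recursing)
def countFalse (s : List (List Bool)) : Nat :=
  (s.map (fun rw => rw.count false)).sum

-- A's dfs, fuel-guarded for totality (the fuel passed by move_seen is provably sufficient:
-- see the simulation lemmas below).  State (grid, seen) is threaded; result (point, grid, seen).
def dfsA : Nat → List (List String) → Int → Int → Int → String → List (List Bool) →
    Int × List (List String) × List (List Bool)
  | 0, g, _, _, _, _, s => (0, g, s)
  | f+1, g, r, c, N, p, s =>
    if r = -1 ∨ c = -1 ∨ r = N ∨ c = N ∨ seenB s r c = true ∨ cellS g r c ≠ p then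
      (0, g, s)
    else
      let s1 := setSeen s r c
      let g1 := setCell g r c
      let t1 := dfsA f g1 (r-1) c N p s1
      let t2 := dfsA f t1.2.1 (r+1) c N p t1.2.2
      let t3 := dfsA f t2.2.1 r (c-1) N p t2.2.2
      let t4 := dfsA f t3.2.1 r (c+1) N p t3.2.2
      (1 + t1.1 + t2.1 + t3.1 + t4.1, t4.2.1, t4.2.2)

def move_seen (grid : List (List String)) (row : Int) (col : Int) (seen : List (List Bool)) : Int :=
  let p := cellS grid row col
  let N : Int := PySem.List.len grid
  let t := dfsA (countFalse seen + 1) grid row col N p seen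
  -- A's drop loop mutates grid in place only; it cannot influence the returned int
  t.1 * t.1

-- ===== PORT B =====
-- cited by floodB's decreasing_by (the port needs it for termination); its two counting
-- helpers are inlined so that every standalone lemma sits below the claim block
lemma countFalse_setSeen_lt (s : List (List Bool)) (r c : Int)
    (h : seenB s r c = false) : countFalse (setSeen s r c) < countFalse s := by
  have count_eq : ∀ (row : List Bool) (n : Nat), row[n]? = some false →
      (row.set n true).count false + 1 = row.count false := by
    intro row
    induction row with
    | nil => intro n h'; simp at h'
    | cons b bs ih =>
      intro n h'
      cases n with
      | zero => simp_all [List.set]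
      | succ m =>
        simp only [List.getElem?_cons_succ] at h'
        cases b <;> simpa [List.set, List.count_cons] using ih m h'
  have cf_set : ∀ (l : List (List Bool)) (n : Nat) (row r' : List Bool), l[n]? = some row →
      countFalse (l.set n r') + row.count false = countFalse l + r'.count false := by
    intro l
    induction l with
    | nil => intro n row r' h'; simp at h'
    | cons x xs ih =>
      intro n row r' h'
      cases n with
      | zero =>
        simp only [List.getElem?_cons_zero, Option.some.injEq] at h'
        subst h'; simp [countFalse, List.set]; omega
      | succ m =>
        simp only [List.getElem?_cons_succ] at h'
        have := ih m row r' h'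
        simp only [countFalse, List.set, List.map_cons, List.sum_cons] at *
        omega
  unfold seenB at h
  cases hg : PySem.List.pyGet? s r with
  | none => simp [hg] at h
  | some rw =>
    cases hc : PySem.List.pyGet? rw c with
    | none => simp [hg, hc] at h
    | some b =>
      simp only [hg, hc, Option.bind_some, Option.getD_some] at h
      subst h
      unfold PySem.List.pyGet? at hg hc
      cases hk : PySem.List.pyIdx? s.length r with
      | none => simp [hk] at hg
      | some k =>
        cases hj : PySem.List.pyIdx? rw.length c with
        | none => simp [hj] at hc
        | some j =>
          simp only [hk, Option.bind_some] at hg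
          simp only [hj, Option.bind_some] at hc
          have hrow : PySem.List.pyGetD s r [] = rw := by
            simp [PySem.List.pyGetD, PySem.List.pyGet?, hk, hg]
          have hset : setSeen s r c = s.set k (rw.set j true) := by
            simp [setSeen, hrow, PySem.List.pySetD, PySem.List.pySet?, hk, hj]
          rw [hset]
          have h1 := cf_set s k rw (rw.set j true) hg
          have h2 := count_eq rw j hc
          omega

def floodB (g : List (List String)) (stack : List (Int × Int)) (N : Int) (p : String)
    (s : List (List Bool)) : Int × List (List String) × List (List Bool) :=
  match stack with
  | [] => (0, g, s)
  | (r, c) :: rest =>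
    if r < 0 ∨ c < 0 ∨ N ≤ r ∨ N ≤ c ∨ seenB s r c = true ∨ cellS g r c ≠ p then
      floodB g rest N p s
    else
      let s1 := setSeen s r c
      let g1 := setCell g r c
      let t := floodB g1 ((r-1, c) :: (r+1, c) :: (r, c-1) :: (r, c+1) :: rest) N p s1
      (t.1 + 1, t.2.1, t.2.2)
termination_by (countFalse s, stack.length)
decreasing_by
  · exact Prod.Lex.right _ (by simp)
  · rename_i h
    push_neg at h
    exact Prod.Lex.left _ _ (countFalse_setSeen_lt s r c (by simpa using h.2.2.2.2.1))

def move_seen_alt (grid : List (List String)) (row : Int) (col : Int) (seen : List (List Bool)) : Int :=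
  let N : Int := PySem.List.len grid
  let p := cellS grid row col
  let t := floodB grid [(row, col)] N p seen
  -- B's per-column rebuild mutates grid in place only; it cannot influence the returned int
  t.1 * t.1

-- ===== PRECONDITION & SPEC =====
-- Pre_: grid/seen rows cover the N×N board (N = len(grid), needed for A's drop pass to return) and
-- the start is either a proper in-range cell, or a degenerate start on which the very first dfs
-- guard already answers 0 (row/col = -1, or the start's seen entry is True).  Outside it A either
-- raises IndexError or — on other negative start coordinates — returns a flood count obtained
-- through Python's negative-index wraparound, a value B's bounds-checked flood fill does not
-- reproduce (see claim cites).
def Pre_move_seen (grid : List (List String)) (row : Int) (col : Int) (seen : List (List Bool)) : Prop :=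
  (∀ rw ∈ grid, grid.length ≤ rw.length) ∧
  grid.length ≤ seen.length ∧ (∀ rw ∈ seen, grid.length ≤ rw.length) ∧
  ((0 ≤ row ∧ row < grid.length ∧ 0 ≤ col ∧ col < grid.length) ∨
   (((PySem.List.pyGet? grid row).bind (fun rw => PySem.List.pyGet? rw col)).isSome = true ∧
    (row = -1 ∨ col = -1 ∨
     ((PySem.List.pyGet? seen row).bind (fun rw => PySem.List.pyGet? rw col)) = some true)))
instance (grid : List (List String)) (row : Int) (col : Int) (seen : List (List Bool)) : Decidable (Pre_move_seen grid row col seen) := by unfold Pre_move_seen; infer_instance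

def pvWitness_move_seen : List (List String) × Int × Int × List (List Bool) :=
  ([["a", "a"], ["b", "a"]], 0, 0, [[false, false], [false, false]])

def Spec_move_seen (grid : List (List String)) (row : Int) (col : Int) (seen : List (List Bool)) (out : Int) : Prop := out = move_seen_alt grid row col seen
instance (grid : List (List String)) (row : Int) (col : Int) (seen : List (List Bool)) (out : Int) : Decidable (Spec_move_seen grid row col seen out) := by unfold Spec_move_seen; infer_instance

-- ===== CLAIM (what is proved, stated in full; the proofs are below) =====
def Claim_equal_move_seen : Prop := ∀ (grid : List (List String)) (row : Int) (col : Int) (seen : List (List Bool)), Dom_move_seen grid row col seen → Pre_move_seen grid row col seen → Spec_move_seen grid row col seen (move_seen grid row col seen)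

-- ===== LEMMAS AND PROOFS =====

lemma count_set_true_le (row : List Bool) (n : Nat) :
    (row.set n true).count false ≤ row.count false := by
  induction row generalizing n with
  | nil => simp
  | cons b bs ih =>
    cases n with
    | zero => cases b <;> simp [List.set, List.count_cons]
    | succ m => cases b <;> simpa [List.set, List.count_cons] using ih m

lemma countFalse_set (s : List (List Bool)) (n : Nat) (row r' : List Bool)
    (h : s[n]? = some row) :
    countFalse (s.set n r') + row.count false = countFalse s + r'.count false := by
  induction s generalizing n with
  | nil => simp at h
  | cons x xs ih =>
    cases n with
    | zero =>
      simp only [List.getElem?_cons_zero, Option.some.injEq] at h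
      subst h; simp [countFalse, List.set]; omega
    | succ m =>
      simp only [List.getElem?_cons_succ] at h
      have := ih m h
      simp only [countFalse, List.set, List.map_cons, List.sum_cons] at *
      omega


lemma countFalse_setSeen_le (s : List (List Bool)) (r c : Int) :
    countFalse (setSeen s r c) ≤ countFalse s := by
  unfold setSeen PySem.List.pySetD PySem.List.pySet?
  cases hk : PySem.List.pyIdx? s.length r with
  | none => simp
  | some k =>
    simp only [Option.map_some, Option.getD_some]
    cases hg : s[k]? with
    | none =>
      have hlen : s.length ≤ k := by
        rcases Nat.lt_or_ge k s.length with hlt | hge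
        · simp [List.getElem?_eq_getElem hlt] at hg
        · exact hge
      rw [List.set_eq_of_length_le hlen]
    | some rw =>
      have hrow : PySem.List.pyGetD s r [] = rw := by
        simp [PySem.List.pyGetD, PySem.List.pyGet?, hk, hg]
      rw [hrow]
      cases hj : PySem.List.pyIdx? rw.length c with
      | none =>
        have hred : ((Option.map (fun k => rw.set k true) (none : Option Nat)).getD rw) = rw := rfl
        rw [hred]
        have := countFalse_set s k rw rw hg
        omega
      | some j =>
        simp only [Option.map_some, Option.getD_some]
        have h1 := countFalse_set s k rw (rw.set j true) hg
        have h2 := count_set_true_le rw j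
        omega

lemma seenB_false_pos (s : List (List Bool)) (r c : Int)
    (h : seenB s r c = false) : 0 < countFalse s := by
  unfold seenB at h
  cases hg : PySem.List.pyGet? s r with
  | none => simp [hg] at h
  | some rw =>
    cases hc : PySem.List.pyGet? rw c with
    | none => simp [hg, hc] at h
    | some b =>
      simp only [hg, hc, Option.bind_some, Option.getD_some] at h
      subst h
      have hmem : rw ∈ s := PySem.List.mem_of_pyGet?_eq_some _ hg
      have hfmem : false ∈ rw := PySem.List.mem_of_pyGet?_eq_some _ hc
      have h1 : 0 < rw.count false := List.count_pos_iff.mpr hfmem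
      have h2 : rw.count false ≤ countFalse s := by
        unfold countFalse
        exact List.single_le_sum (by intro x _; omega) _ (List.mem_map_of_mem hmem)
      omega

lemma dfsA_mono (f : Nat) (g : List (List String)) (r c N : Int) (p : String)
    (s : List (List Bool)) : countFalse (dfsA f g r c N p s).2.2 ≤ countFalse s := by
  induction f generalizing g r c s with
  | zero => simp [dfsA]
  | succ f ih =>
    simp only [dfsA]
    split
    · simp
    · dsimp only
      exact le_trans (ih _ _ _ _) (le_trans (ih _ _ _ _) (le_trans (ih _ _ _ _)
        (le_trans (ih _ _ _ _) (countFalse_setSeen_le s r c))))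

-- core simulation: popping (r,c) off the stack runs A's dfs on (r,c) and then the rest of the stack
lemma sim (n : Nat) : ∀ (f : Nat) (g : List (List String)) (r c N : Int) (p : String)
    (s : List (List Bool)) (rest : List (Int × Int)),
    countFalse s ≤ n → n < f → -1 ≤ r → r ≤ N → -1 ≤ c → c ≤ N →
    floodB g ((r, c) :: rest) N p s =
      ((dfsA f g r c N p s).1 +
         (floodB (dfsA f g r c N p s).2.1 rest N p (dfsA f g r c N p s).2.2).1,
       (floodB (dfsA f g r c N p s).2.1 rest N p (dfsA f g r c N p s).2.2).2) := by
  induction n with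
  | zero =>
    intro f g r c N p s rest hcnt hf hr1 hr2 hc1 hc2
    obtain ⟨f, rfl⟩ : ∃ f', f = f' + 1 := ⟨f - 1, by omega⟩
    have hseen : seenB s r c = true := by
      by_contra h
      have := seenB_false_pos s r c (by simpa using h)
      omega
    rw [floodB]
    simp [dfsA, hseen]
  | succ n ih =>
    intro f g r c N p s rest hcnt hf hr1 hr2 hc1 hc2
    obtain ⟨f, rfl⟩ : ∃ f', f = f' + 1 := ⟨f - 1, by omega⟩
    by_cases hseen : seenB s r c = true
    · rw [floodB]; simp [dfsA, hseen]
    · by_cases hcell : cellS g r c = p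
      · by_cases hnum : r = -1 ∨ c = -1 ∨ r = N ∨ c = N
        · -- boundary: both guards fire
          rw [floodB]
          have hb : r < 0 ∨ c < 0 ∨ N ≤ r ∨ N ≤ c := by omega
          simp only [dfsA]
          rw [if_pos (by tauto), if_pos (by tauto)]
          symm
          exact Prod.ext (zero_add _) rfl
        · -- interior unseen matching cell: both recurse
          have hr0 : 0 ≤ r := by omega
          have hrN : r < N := by omega
          have hc0 : 0 ≤ c := by omega
          have hcN : c < N := by omega
          have hsf : seenB s r c = false := by simpa using hseen
          have hlt := countFalse_setSeen_lt s r c hsf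
          rw [floodB]
          rw [if_neg (by push_neg; exact ⟨by omega, by omega, by omega, by omega,
                by simpa using hseen, by simpa using hcell⟩)]
          simp only [dfsA]
          rw [if_neg (by push_neg; exact ⟨by omega, by omega, by omega, by omega,
                by simpa using hseen, by simpa using hcell⟩)]
          dsimp only
          set s1 := setSeen s r c with hs1
          set g1 := setCell g r c with hg1
          have hcnt1 : countFalse s1 ≤ n := by omega
          -- peel the four pushed neighbours with the induction hypothesis
          set t1 := dfsA f g1 (r-1) c N p s1 with ht1
          set t2 := dfsA f t1.2.1 (r+1) c N p t1.2.2 with ht2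
          set t3 := dfsA f t2.2.1 r (c-1) N p t2.2.2 with ht3
          set t4 := dfsA f t3.2.1 r (c+1) N p t3.2.2 with ht4
          have m1 : countFalse t1.2.2 ≤ n := le_trans (dfsA_mono ..) hcnt1
          have m2 : countFalse t2.2.2 ≤ n := le_trans (dfsA_mono ..) m1
          have m3 : countFalse t3.2.2 ≤ n := le_trans (dfsA_mono ..) m2
          rw [ih f g1 (r-1) c N p s1 _ hcnt1 (by omega) (by omega) (by omega) (by omega) (by omega)]
          rw [ih f t1.2.1 (r+1) c N p t1.2.2 _ m1 (by omega) (by omega) (by omega) (by omega) (by omega)]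
          rw [ih f t2.2.1 r (c-1) N p t2.2.2 _ m2 (by omega) (by omega) (by omega) (by omega) (by omega)]
          rw [ih f t3.2.1 r (c+1) N p t3.2.2 _ m3 (by omega) (by omega) (by omega) (by omega) (by omega)]
          rw [← ht1, ← ht2, ← ht3, ← ht4]
          exact Prod.ext (by dsimp only; omega) rfl
      · rw [floodB]
        simp only [dfsA]
        rw [if_pos (by tauto), if_pos (by tauto)]
        symm
        exact Prod.ext (zero_add _) rfl

-- ===== VERDICT (by name: the statement is the Claim_ definition above) =====
theorem move_seen_spec : Claim_equal_move_seen := by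
  intro grid row col seen _ hpre
  obtain ⟨_, _, _, hcase⟩ := hpre
  unfold Spec_move_seen move_seen move_seen_alt
  dsimp only
  rcases hcase with ⟨h1, h2, h3, h4⟩ | ⟨_, hE⟩
  · have := sim (countFalse seen) (countFalse seen + 1) grid row col
      (PySem.List.len grid) (cellS grid row col) seen [] (le_refl _) (by omega)
      (by omega) (by simp [PySem.List.len_eq]; omega)
      (by omega) (by simp [PySem.List.len_eq]; omega)
    rw [this, floodB]
    dsimp only
    ring
  · -- degenerate start: the first guard of both versions answers 0
    have hga : row = -1 ∨ col = -1 ∨ row = PySem.List.len grid ∨ col = PySem.List.len grid ∨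
        seenB seen row col = true ∨ cellS grid row col ≠ cellS grid row col := by
      rcases hE with h | h | h
      · exact Or.inl h
      · exact Or.inr (Or.inl h)
      · exact Or.inr (Or.inr (Or.inr (Or.inr (Or.inl (by simp [seenB, h])))))
    have hgb : row < 0 ∨ col < 0 ∨ PySem.List.len grid ≤ row ∨ PySem.List.len grid ≤ col ∨
        seenB seen row col = true ∨ cellS grid row col ≠ cellS grid row col := by
      rcases hE with h | h | h
      · exact Or.inl (by omega)
      · exact Or.inr (Or.inl (by omega))
      · exact Or.inr (Or.inr (Or.inr (Or.inr (Or.inl (by simp [seenB, h])))))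
    rw [floodB, if_pos hgb, floodB]
    simp only [dfsA]
    rw [if_pos hga]
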